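-- pv_equiv track=rewrite | github.com/Aeilko/Advent-of-Code-2022 | day17/solution.py | add_rock
-- ===== SOURCE A (Python) =====
-- SHAPES = [
--     [(0, 0), (1, 0), (2, 0), (3, 0)],
--     [(0, 1), (1, 0), (1, 1), (1, 2), (2, 1)],
--     [(0, 0), (1, 0), (2, 0), (2, 1), (2, 2)],
--     [(0, 0), (0, 1), (0, 2), (0, 3)],
--     [(0, 0), (1, 0), (0, 1), (1, 1)]
-- ]
--
-- def add_rock(board, moves, highest_y, rock_counter, move_counter):
--     # Spawn rock
--     cur_rock = {}
--     (x, y) = (2, highest_y + 4)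
--     shape = SHAPES[(rock_counter % len(SHAPES))]
--     min_x = 2
--     max_x = 0
--     max_y = 0
--     for (dx, dy) in shape:
--         cur_rock[(x + dx, y + dy)] = True
--         max_x = max(x + dx, max_x)
--         max_y = max(y + dy, max_y)
--
--     # Moving loop
--     while True:
--         # Move sideways
--         move = moves[(move_counter % len(moves))]
--         if move == '<' and min_x > 0:
--             new_rock = {}
--             for (x, y) in cur_rock:
--                 new_rock[(x - 1, y)] = True
--
--             can_move = True
--             for (x, y) in new_rock:
--                 if (x, y) in board:
--                     can_move = False
--                     break
--             if can_move:
--                 min_x -= 1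
--                 max_x -= 1
--                 cur_rock = new_rock
--         elif move == '>' and max_x < 6:
--             new_rock = {}
--             for (x, y) in cur_rock:
--                 new_rock[(x + 1, y)] = True
--             can_move = True
--             for (x, y) in new_rock:
--                 if (x, y) in board:
--                     can_move = False
--                     break
--             if can_move:
--                 min_x += 1
--                 max_x += 1
--                 cur_rock = new_rock
--         move_counter += 1
--
--         # Move down
--         can_move = True
--         for (x, y) in cur_rock:
--             if (x, y - 1) in board:
--                 can_move = False
--                 break
--             elif y - 1 < 0:
--                 can_move = False
--                 break
--         if can_move:
--             # Can move down
--             new_rock = {}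
--             for (x, y) in cur_rock:
--                 new_rock[(x, y - 1)] = True
--             max_y -= 1
--             cur_rock = new_rock
--         else:
--             # Cant move, save rock and continue to the next rock
--             for (x, y) in cur_rock:
--                 board.add((x, y))
--             highest_y = max(max_y, highest_y)
--             break
--
--     return board, highest_y, move_counter
-- ===== SOURCE B (Python) =====
-- SHAPES = [
--     [(0, 0), (1, 0), (2, 0), (3, 0)],
--     [(0, 1), (1, 0), (1, 1), (1, 2), (2, 1)],
--     [(0, 0), (1, 0), (2, 0), (2, 1), (2, 2)],
--     [(0, 0), (0, 1), (0, 2), (0, 3)],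
--     [(0, 0), (1, 0), (0, 1), (1, 1)]
-- ]
--
--
-- def add_rock(board, moves, highest_y, rock_counter, move_counter):
--     # Bit-parallel collision detection: the board is compiled once into a map
--     # y -> 7-bit row mask and the shape into (dy, row-bitmask) rows; each push
--     # and drop test is a shift-and-AND per occupied row, so the rock's cells
--     # are never materialised and no per-cell set scan happens until it lands.
--     shape = SHAPES[rock_counter % len(SHAPES)]
--     rows = {}
--     for (x, y) in board:
--         if 0 <= x <= 6:
--             rows[y] = rows.get(y, 0) | (1 << x)
--     shape_rows = {}
--     for (dx, dy) in shape:
--         shape_rows[dy] = shape_rows.get(dy, 0) | (1 << dx)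
--     max_dx = max(dx for dx, dy in shape)
--     max_dy = max(dy for dx, dy in shape)
--     px, py = 2, highest_y + 4
--
--     def free(qx, qy):
--         return all((m << qx) & rows.get(qy + dy, 0) == 0
--                    for dy, m in shape_rows.items())
--
--     while True:
--         move = moves[move_counter % len(moves)]
--         move_counter += 1
--         if move == '<':
--             if px > 0 and free(px - 1, py):
--                 px -= 1
--         elif move == '>':
--             if px + max_dx < 6 and free(px + 1, py):
--                 px += 1
--         if py > 0 and free(px, py - 1):
--             py -= 1
--         else:
--             for dx, dy in shape:
--                 board.add((px + dx, py + dy))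
--             return board, max(highest_y, py + max_dy, 0), move_counter
-- ===== Notes on version B (the rewrite author's own statement) =====
-- stated objective: alternative
-- what changed: B compiles the board once into a y -> 7-bit row-mask dict and the shape into (dy, bitmask) rows, so every push/drop collision test is one shift-and-AND per occupied row instead of A's rebuilding a dict of absolute rock cells and scanning it cell by cell against the board set; the rock is tracked only as an anchor and its cells are materialised once, at landing.
import Mathlib
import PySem

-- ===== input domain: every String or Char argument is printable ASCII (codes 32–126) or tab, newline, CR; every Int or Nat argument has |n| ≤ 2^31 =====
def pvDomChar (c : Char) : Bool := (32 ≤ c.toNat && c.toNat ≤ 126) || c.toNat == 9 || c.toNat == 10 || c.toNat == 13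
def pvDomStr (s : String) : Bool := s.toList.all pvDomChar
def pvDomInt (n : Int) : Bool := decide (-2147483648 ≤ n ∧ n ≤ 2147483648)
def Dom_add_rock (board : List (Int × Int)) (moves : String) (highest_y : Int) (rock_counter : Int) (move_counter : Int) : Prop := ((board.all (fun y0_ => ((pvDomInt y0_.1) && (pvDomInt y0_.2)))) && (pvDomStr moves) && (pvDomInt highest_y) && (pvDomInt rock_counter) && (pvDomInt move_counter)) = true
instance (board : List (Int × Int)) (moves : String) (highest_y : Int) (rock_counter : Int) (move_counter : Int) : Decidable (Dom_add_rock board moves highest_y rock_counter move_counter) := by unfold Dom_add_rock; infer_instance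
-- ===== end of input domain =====

-- B replaces A's per-cell set scans over a rebuilt dict of absolute rock cells by bit-parallel
-- collision tests: the board is compiled once into a y -> row-bitmask dict, the shape into
-- (dy, bitmask) rows, and each push/drop test is one shift-and-AND per occupied row; equivalence
-- is about the RETURN value (Python A mutates the board set in place, B performs the same additions).

-- ===== PORT A =====
def pvShapes : List (List (Int × Int)) :=
  [[(0, 0), (1, 0), (2, 0), (3, 0)],
   [(0, 1), (1, 0), (1, 1), (1, 2), (2, 1)],
   [(0, 0), (1, 0), (2, 0), (2, 1), (2, 2)],
   [(0, 0), (0, 1), (0, 2), (0, 3)],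
   [(0, 0), (1, 0), (0, 1), (1, 1)]]

-- the spawn loop of A: builds cur_rock and the running max_x / max_y
def pvSpawnA (x y : Int) (shape : List (Int × Int)) :
    PySem.Dict (Int × Int) Bool × Int × Int :=
  shape.foldl
    (fun s c => (s.1.insert (x + c.1, y + c.2) true, max (x + c.1) s.2.1, max (y + c.2) s.2.2))
    (PySem.Dict.empty, 0, 0)

-- the `while True` loop of A (fuel is only a totality device; (highest_y+5).toNat+1 always suffices)
def pvLoopA (board : List (Int × Int)) (moves : List Char) (highest_y : Int) :
    Nat → PySem.Dict (Int × Int) Bool → Int → Int → Int → Int →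
    (List (Int × Int)) × Int × Int
  | 0, _, _, _, _, mc => (board, highest_y, mc)
  | fuel + 1, cur, min_x, max_x, max_y, mc =>
    let move := PySem.List.pyGetD moves (PySem.Int.mod mc (moves.length : Int)) ' '
    let s2 :=
      if move = '<' ∧ min_x > 0 then
        let newRock := cur.keys.foldl
          (fun d p => d.insert (p.1 - 1, p.2) true) PySem.Dict.empty
        if newRock.keys.all (fun p => !(board.contains p)) then
          (newRock, min_x - 1, max_x - 1)
        else (cur, min_x, max_x)
      else if move = '>' ∧ max_x < 6 then
        let newRock := cur.keys.foldl
          (fun d p => d.insert (p.1 + 1, p.2) true) PySem.Dict.empty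
        if newRock.keys.all (fun p => !(board.contains p)) then
          (newRock, min_x + 1, max_x + 1)
        else (cur, min_x, max_x)
      else (cur, min_x, max_x)
    let mc2 := mc + 1
    if s2.1.keys.all (fun p => !(board.contains (p.1, p.2 - 1)) && !(decide (p.2 - 1 < 0))) then
      pvLoopA board moves highest_y fuel
        (s2.1.keys.foldl (fun d p => d.insert (p.1, p.2 - 1) true) PySem.Dict.empty)
        s2.2.1 s2.2.2 (max_y - 1) mc2
    else
      (s2.1.keys.foldl (fun b p => PySem.Set.add b p) board, max max_y highest_y, mc2)

def add_rock (board : List (Int × Int)) (moves : String) (highest_y : Int) (rock_counter : Int) (move_counter : Int) : (List (Int × Int)) × Int × Int :=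
  let shape := PySem.List.pyGetD pvShapes (PySem.Int.mod rock_counter (pvShapes.length : Int)) []
  let sp := pvSpawnA 2 (highest_y + 4) shape
  pvLoopA board moves.toList highest_y ((highest_y + 5).toNat + 1) sp.1 2 sp.2.1 sp.2.2 move_counter

-- ===== PORT B =====
-- the board compiled into a dict y -> 7-bit row mask (cells outside columns 0..6 can never collide)
def pvRowStep (d : PySem.Dict Int Nat) (p : Int × Int) : PySem.Dict Int Nat :=
  if 0 ≤ p.1 ∧ p.1 ≤ 6 then d.insert p.2 ((d.getD p.2 0) ||| (1 <<< p.1.toNat)) else d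

def pvRowsOf (board : List (Int × Int)) : PySem.Dict Int Nat :=
  board.foldl pvRowStep PySem.Dict.empty

-- the shape compiled into a dict dy -> bitmask of its dx's
def pvShapeStep (d : PySem.Dict Int Nat) (c : Int × Int) : PySem.Dict Int Nat :=
  d.insert c.2 ((d.getD c.2 0) ||| (1 <<< c.1.toNat))

def pvShapeRowsOf (shape : List (Int × Int)) : PySem.Dict Int Nat :=
  shape.foldl pvShapeStep PySem.Dict.empty

-- free(qx, qy): one shift-and-AND per occupied shape row (qx is ≥ 0 at every call site)
def pvFree (rows : PySem.Dict Int Nat) (srows : List (Int × Nat)) (qx qy : Int) : Bool :=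
  srows.all (fun r => ((r.2 <<< qx.toNat) &&& (rows.getD (qy + r.1) 0)) == 0)

def pvLoopB (board : List (Int × Int)) (moves : List Char) (highest_y : Int)
    (shape : List (Int × Int)) (rows : PySem.Dict Int Nat) (srows : List (Int × Nat))
    (max_dx max_dy : Int) :
    Nat → Int → Int → Int → (List (Int × Int)) × Int × Int
  | 0, _, _, mc => (board, highest_y, mc)
  | fuel + 1, px, py, mc =>
    let move := PySem.List.pyGetD moves (PySem.Int.mod mc (moves.length : Int)) ' '
    let mc' := mc + 1
    let px' :=
      if move = '<' then
        if px > 0 ∧ pvFree rows srows (px - 1) py then px - 1 else px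
      else if move = '>' then
        if px + max_dx < 6 ∧ pvFree rows srows (px + 1) py then px + 1 else px
      else px
    if py > 0 ∧ pvFree rows srows px' (py - 1) then
      pvLoopB board moves highest_y shape rows srows max_dx max_dy fuel px' (py - 1) mc'
    else
      (shape.foldl (fun b c => PySem.Set.add b (px' + c.1, py + c.2)) board,
       max (max highest_y (py + max_dy)) 0, mc')

def add_rock_alt (board : List (Int × Int)) (moves : String) (highest_y : Int) (rock_counter : Int) (move_counter : Int) : (List (Int × Int)) × Int × Int :=
  let shape := PySem.List.pyGetD pvShapes (PySem.Int.mod rock_counter (pvShapes.length : Int)) []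
  let rows := pvRowsOf board
  let srows := (pvShapeRowsOf shape).items
  let max_dx := (PySem.List.max? (shape.map (fun c => c.1)) (fun v => v)).getD 0
  let max_dy := (PySem.List.max? (shape.map (fun c => c.2)) (fun v => v)).getD 0
  pvLoopB board moves.toList highest_y shape rows srows max_dx max_dy
    ((highest_y + 5).toNat + 1) 2 (highest_y + 4) move_counter

-- ===== PRECONDITION & SPEC =====
-- Pre_ excludes only the empty move string, on which Python A raises ZeroDivisionError.
def Pre_add_rock (board : List (Int × Int)) (moves : String) (highest_y : Int) (rock_counter : Int) (move_counter : Int) : Prop := moves ≠ ""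
instance (board : List (Int × Int)) (moves : String) (highest_y : Int) (rock_counter : Int) (move_counter : Int) : Decidable (Pre_add_rock board moves highest_y rock_counter move_counter) := by unfold Pre_add_rock; infer_instance
def pvWitness_add_rock : (List (Int × Int)) × String × Int × Int × Int := ([(0, 0)], "<>", 0, 1, 2)

def Spec_add_rock (board : List (Int × Int)) (moves : String) (highest_y : Int) (rock_counter : Int) (move_counter : Int) (out : (List (Int × Int)) × Int × Int) : Prop := out = add_rock_alt board moves highest_y rock_counter move_counter
instance (board : List (Int × Int)) (moves : String) (highest_y : Int) (rock_counter : Int) (move_counter : Int) (out : (List (Int × Int)) × Int × Int) : Decidable (Spec_add_rock board moves highest_y rock_counter move_counter out) := by unfold Spec_add_rock; infer_instance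

-- ===== CLAIM (what is proved, stated in full; the proofs are below) =====
def Claim_equal_add_rock : Prop := ∀ (board : List (Int × Int)) (moves : String) (highest_y : Int) (rock_counter : Int) (move_counter : Int), Dom_add_rock board moves highest_y rock_counter move_counter → Pre_add_rock board moves highest_y rock_counter move_counter → Spec_add_rock board moves highest_y rock_counter move_counter (add_rock board moves highest_y rock_counter move_counter)

-- ===== LEMMAS AND PROOFS =====

-- proof-only intermediate loop: B's control flow with the per-cell tests A's dict tests reduce to
def pvLoopS (board : List (Int × Int)) (moves : List Char) (highest_y : Int)
    (shape : List (Int × Int)) (max_dx max_dy : Int) :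
    Nat → Int → Int → Int → (List (Int × Int)) × Int × Int
  | 0, _, _, mc => (board, highest_y, mc)
  | fuel + 1, px, py, mc =>
    let move := PySem.List.pyGetD moves (PySem.Int.mod mc (moves.length : Int)) ' '
    let mc' := mc + 1
    let px' :=
      if move = '<' then
        if px > 0 ∧ shape.all (fun c => !(board.contains (px - 1 + c.1, py + c.2))) then px - 1
        else px
      else if move = '>' then
        if px + max_dx < 6 ∧ shape.all (fun c => !(board.contains (px + 1 + c.1, py + c.2))) then px + 1
        else px
      else px
    if py > 0 ∧ shape.all (fun c => !(board.contains (px' + c.1, py - 1 + c.2))) then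
      pvLoopS board moves highest_y shape max_dx max_dy fuel px' (py - 1) mc'
    else
      (shape.foldl (fun b c => PySem.Set.add b (px' + c.1, py + c.2)) board,
       max (max highest_y (py + max_dy)) 0, mc')

-- ---- bitmask facts ----

lemma pv_and_eq_zero_iff (a b : Nat) :
    a &&& b = 0 ↔ ∀ i, ¬(a.testBit i = true ∧ b.testBit i = true) := by
  constructor
  · intro h i hi
    have h' := congrArg (fun x => Nat.testBit x i) h
    simp only [Nat.testBit_and, hi.1, hi.2, Bool.and_self, Nat.zero_testBit] at h'
    exact absurd h' (by decide)
  · intro h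
    apply Nat.zero_of_testBit_eq_false
    intro i
    rw [Nat.testBit_and]
    by_cases ha : a.testBit i = true
    · by_cases hb : b.testBit i = true
      · exact absurd ⟨ha, hb⟩ (h i)
      · simp [Bool.not_eq_true] at hb; simp [hb]
    · simp [Bool.not_eq_true] at ha; simp [ha]

lemma pv_testBit_one_shift (k i : Nat) : (1 <<< k).testBit i = decide (i = k) := by
  rw [Nat.one_shiftLeft, Nat.testBit_two_pow]
  simp [eq_comm]

-- the row-mask dict of the board reads back exactly board membership on columns 0..6
lemma pv_rows_step_bit (d : PySem.Dict Int Nat) (p : Int × Int) (y : Int) (j : Nat) (hj : j ≤ 6) :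
    ((pvRowStep d p).getD y 0).testBit j
      = ((d.getD y 0).testBit j || decide (((j : Int), y) = p)) := by
  apply Bool.eq_iff_iff.mpr
  simp only [Bool.or_eq_true, decide_eq_true_eq, Prod.ext_iff]
  unfold pvRowStep
  split_ifs with hr
  · rw [PySem.Dict.getD_insert]
    by_cases hy : y = p.2
    · subst hy
      rw [if_pos rfl]
      simp only [Nat.testBit_or, pv_testBit_one_shift, Bool.or_eq_true, decide_eq_true_eq]
      constructor
      · rintro (h | h)
        · exact Or.inl h
        · exact Or.inr ⟨by omega, trivial⟩
      · rintro (h | ⟨h1, _⟩)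
        · exact Or.inl h
        · exact Or.inr (by omega)
    · rw [if_neg hy]
      constructor
      · exact Or.inl
      · rintro (h | ⟨_, h2⟩)
        · exact h
        · exact absurd h2 hy
  · constructor
    · exact Or.inl
    · rintro (h | ⟨h1, _⟩)
      · exact h
      · omega

lemma pv_rows_aux (l : List (Int × Int)) :
    ∀ (d : PySem.Dict Int Nat) (y : Int) (j : Nat), j ≤ 6 →
    ((l.foldl pvRowStep d).getD y 0).testBit j
      = ((d.getD y 0).testBit j || l.contains ((j : Int), y)) := by
  induction l with
  | nil => intro d y j _; simp
  | cons p ps ih =>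
    intro d y j hj
    rw [List.foldl_cons, ih _ y j hj, pv_rows_step_bit d p y j hj, List.contains_cons]
    have : (((j : Int), y) == p) = decide (((j : Int), y) = p) := by
      apply Bool.eq_iff_iff.mpr
      simp [beq_iff_eq]
    rw [this, Bool.or_assoc]

lemma pv_rowsOf_bit (board : List (Int × Int)) (y : Int) (j : Nat) (hj : j ≤ 6) :
    ((pvRowsOf board).getD y 0).testBit j = board.contains ((j : Int), y) := by
  unfold pvRowsOf
  rw [pv_rows_aux board PySem.Dict.empty y j hj]
  simp

-- the shape-row dict: every stored mask reads back shape membership, and every dy of the shape is a key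
lemma pv_srows_aux (l : List (Int × Int)) :
    ∀ (d : PySem.Dict Int Nat) (l₀ : List (Int × Int)),
    (∀ c ∈ l, 0 ≤ c.1) →
    d.keys.Nodup →
    (∀ p ∈ d.items, ∀ i : Nat, p.2.testBit i = (l₀.contains ((i : Int), p.1))) →
    (∀ y : Int, d.contains y = false → ∀ i : Nat, (l₀.contains ((i : Int), y)) = false) →
    (∀ p ∈ (l.foldl pvShapeStep d).items, ∀ i : Nat,
        p.2.testBit i = ((l₀ ++ l).contains ((i : Int), p.1))) ∧
    (∀ y : Int, (l.foldl pvShapeStep d).contains y = false → ∀ i : Nat,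
        ((l₀ ++ l).contains ((i : Int), y)) = false) := by
  induction l with
  | nil =>
    intro d l₀ _ _ hP hQ
    simp only [List.foldl_nil, List.append_nil]
    exact ⟨hP, hQ⟩
  | cons c cs ih =>
    intro d l₀ hdx hnd hP hQ
    have hgetD : ∀ i : Nat, (d.getD c.2 0).testBit i = l₀.contains ((i : Int), c.2) := by
      intro i
      by_cases hc : d.contains c.2 = true
      · rw [PySem.Dict.contains_iff_mem_keys] at hc
        have : ∃ p ∈ d.items, p.1 = c.2 := by
          simpa [PySem.Dict.keys, List.mem_map] using hc
        obtain ⟨p, hp, hp1⟩ := this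
        have hv : d.getD c.2 0 = p.2 := by
          have hm : (c.2, p.2) ∈ d.items := by rw [← hp1]; exact hp
          exact PySem.Dict.getD_of_mem_items d hm hnd 0
        rw [hv, ← hp1]
        exact hP p hp i
      · rw [Bool.not_eq_true] at hc
        rw [PySem.Dict.getD_of_not_contains d 0 hc, hQ c.2 hc i]
        simp
    have step : ∀ p ∈ (pvShapeStep d c).items, ∀ i : Nat,
        p.2.testBit i = ((l₀ ++ [c]).contains ((i : Int), p.1)) := by
      intro p hp i
      unfold pvShapeStep at hp
      rw [PySem.Dict.mem_items_insert d c.2 _ p] at hp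
      rcases hp with hp | ⟨hp, hne⟩
      · subst hp
        simp only [Nat.testBit_or, pv_testBit_one_shift, hgetD i, List.contains_append]
        congr 1
        have h0 : 0 ≤ c.1 := hdx c (List.mem_cons_self ..)
        have : ([c].contains ((i : Int), c.2)) = decide (i = c.1.toNat) := by
          apply Bool.eq_iff_iff.mpr
          simp only [List.contains_cons, List.contains_nil, Bool.or_false, beq_iff_eq,
            Prod.ext_iff, decide_eq_true_eq]
          constructor
          · rintro ⟨hh, _⟩; omega
          · intro hh; exact ⟨by omega, trivial⟩
        rw [this]
      · rw [hP p hp i, List.contains_append]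
        have : ([c].contains ((i : Int), p.1)) = false := by
          rw [List.contains_cons, List.contains_nil, Bool.or_false, beq_eq_false_iff_ne]
          intro hcontra
          exact hne (congrArg Prod.snd hcontra)
        rw [this, Bool.or_false]
    have stepQ : ∀ y : Int, (pvShapeStep d c).contains y = false → ∀ i : Nat,
        ((l₀ ++ [c]).contains ((i : Int), y)) = false := by
      intro y hy i
      unfold pvShapeStep at hy
      rw [PySem.Dict.contains_insert d c.2 y _] at hy
      simp only [Bool.or_eq_false_iff, beq_eq_false_iff_ne] at hy
      rw [List.contains_append, hQ y hy.2 i]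
      have : ([c].contains ((i : Int), y)) = false := by
        rw [List.contains_cons, List.contains_nil, Bool.or_false, beq_eq_false_iff_ne]
        intro hcontra
        exact hy.1 (congrArg Prod.snd hcontra)
      rw [this, Bool.or_false]
    have hnd' : (pvShapeStep d c).keys.Nodup := PySem.Dict.nodup_keys_insert d c.2 _ hnd
    have := ih (pvShapeStep d c) (l₀ ++ [c]) (fun x hx => hdx x (List.mem_cons_of_mem _ hx))
      hnd' step stepQ
    rw [List.foldl_cons]
    simpa [List.append_assoc] using this

-- the main bitmask lemma: free(qx, qy) is exactly the per-cell clearance test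
lemma pv_free_eq (board shape : List (Int × Int)) (mdx : Int)
    (hdx : ∀ c ∈ shape, 0 ≤ c.1 ∧ c.1 ≤ mdx)
    (qx qy : Int) (hqx : 0 ≤ qx) (hqm : qx + mdx ≤ 6) :
    pvFree (pvRowsOf board) ((pvShapeRowsOf shape).items) qx qy
      = shape.all (fun c => !(board.contains (qx + c.1, qy + c.2))) := by
  obtain ⟨hP, hQ⟩ := pv_srows_aux shape PySem.Dict.empty [] (fun c hc => (hdx c hc).1)
    (by decide) (by intro p hp; simp [PySem.Dict.empty] at hp) (by intro y _ i; simp)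
  simp only [List.nil_append] at hP hQ
  apply Bool.eq_iff_iff.mpr
  simp only [pvFree, List.all_eq_true, beq_iff_eq, Bool.not_eq_true']
  constructor
  · intro H c hc
    have h0 : 0 ≤ c.1 := (hdx c hc).1
    have hm : c.1 ≤ mdx := (hdx c hc).2
    have hcont : (pvShapeRowsOf shape).contains c.2 = true := by
      by_contra hcc
      rw [Bool.not_eq_true] at hcc
      have := hQ c.2 hcc c.1.toNat
      have hmem : shape.contains ((c.1.toNat : Int), c.2) = true := by
        have : ((c.1.toNat : Int), c.2) = c := by
          rw [Prod.ext_iff]; exact ⟨by omega, rfl⟩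
        rw [this]
        exact List.elem_eq_true_of_mem hc
      rw [hmem] at this
      exact Bool.false_ne_true this.symm
    rw [PySem.Dict.contains_iff_mem_keys] at hcont
    have : ∃ p ∈ (pvShapeRowsOf shape).items, p.1 = c.2 := by
      simpa [PySem.Dict.keys, List.mem_map] using hcont
    obtain ⟨p, hp, hp1⟩ := this
    have hA := H p hp
    rw [pv_and_eq_zero_iff] at hA
    have hbitm : p.2.testBit c.1.toNat = true := by
      rw [hP p hp c.1.toNat, hp1]
      have : ((c.1.toNat : Int), c.2) = c := by rw [Prod.ext_iff]; exact ⟨by omega, rfl⟩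
      rw [this]
      exact List.elem_eq_true_of_mem hc
    have hshift : (p.2 <<< qx.toNat).testBit (qx.toNat + c.1.toNat) = true := by
      rw [Nat.testBit_shiftLeft]
      simp only [Nat.le_add_right, decide_true, Bool.true_and, Nat.add_sub_cancel_left]
      exact hbitm
    have hrow : ((pvRowsOf board).getD (qy + p.1) 0).testBit (qx.toNat + c.1.toNat) = false := by
      by_contra hcr
      rw [Bool.not_eq_false] at hcr
      exact hA _ ⟨hshift, hcr⟩
    rw [pv_rowsOf_bit board (qy + p.1) (qx.toNat + c.1.toNat) (by omega)] at hrow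
    have : ((qx.toNat + c.1.toNat : Nat) : Int) = qx + c.1 := by omega
    rw [this, hp1] at hrow
    exact hrow
  · intro H r hr
    rw [pv_and_eq_zero_iff]
    intro i hi
    obtain ⟨h1, h2⟩ := hi
    rw [Nat.testBit_shiftLeft, Bool.and_eq_true] at h1
    obtain ⟨hle, hbit⟩ := h1
    have hle' : qx.toNat ≤ i := of_decide_eq_true hle
    rw [hP r hr (i - qx.toNat)] at hbit
    have hmem : ((((i - qx.toNat) : Nat) : Int), r.1) ∈ shape := List.mem_of_elem_eq_true hbit
    have hc := hdx _ hmem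
    simp only at hc
    have hi6 : i ≤ 6 := by omega
    rw [pv_rowsOf_bit board (qy + r.1) i hi6] at h2
    have hB := H _ hmem
    have : (qx + ((((i - qx.toNat) : Nat) : Int)), qy + r.1) = ((i : Int), qy + r.1) := by
      rw [Prod.ext_iff]; exact ⟨by omega, rfl⟩
    rw [this] at hB
    rw [hB] at h2
    exact Bool.false_ne_true h2

-- under in-bounds anchors, B's bitmask loop is the per-cell loop pvLoopS
lemma pv_loopB_eq_S (board : List (Int × Int)) (moves : List Char) (hy : Int)
    (shape : List (Int × Int)) (mdx mdy : Int)
    (hdx : ∀ c ∈ shape, 0 ≤ c.1 ∧ c.1 ≤ mdx) :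
    ∀ (fuel : Nat) (px py mc : Int), 0 ≤ px → px + mdx ≤ 6 →
    pvLoopB board moves hy shape (pvRowsOf board) ((pvShapeRowsOf shape).items) mdx mdy fuel px py mc
      = pvLoopS board moves hy shape mdx mdy fuel px py mc := by
  intro fuel
  induction fuel with
  | zero => intro px py mc _ _; rfl
  | succ fuel ih =>
    intro px py mc hpx0 hpxm
    simp only [pvLoopB, pvLoopS]
    set mv := PySem.List.pyGetD moves (PySem.Int.mod mc (moves.length : Int)) ' ' with hmv
    have tail : ∀ px' : Int, 0 ≤ px' → px' + mdx ≤ 6 →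
        ((if py > 0 ∧ pvFree (pvRowsOf board) ((pvShapeRowsOf shape).items) px' (py - 1) then
            pvLoopB board moves hy shape (pvRowsOf board) ((pvShapeRowsOf shape).items) mdx mdy fuel px' (py - 1) (mc + 1)
          else
            (shape.foldl (fun b c => PySem.Set.add b (px' + c.1, py + c.2)) board,
              max (max hy (py + mdy)) 0, mc + 1))
        = (if py > 0 ∧ (shape.all fun c => !board.contains (px' + c.1, py - 1 + c.2)) = true then
            pvLoopS board moves hy shape mdx mdy fuel px' (py - 1) (mc + 1)
          else
            (shape.foldl (fun b c => PySem.Set.add b (px' + c.1, py + c.2)) board,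
              max (max hy (py + mdy)) 0, mc + 1))) := by
      intro px' h0 h6
      have hf := pv_free_eq board shape mdx hdx px' (py - 1) h0 h6
      have harg : ∀ c : Int × Int, (px' + c.1, (py - 1) + c.2) = (px' + c.1, py - 1 + c.2) := fun c => rfl
      rw [hf]
      by_cases hcond : py > 0 ∧ (shape.all fun c => !board.contains (px' + c.1, py - 1 + c.2)) = true
      · rw [if_pos hcond, if_pos hcond]
        exact ih px' (py - 1) (mc + 1) h0 h6
      · rw [if_neg hcond, if_neg hcond]
    by_cases h1 : mv = '<'
    · simp only [if_pos h1]
      by_cases hpx : px > 0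
      · rw [pv_free_eq board shape mdx hdx (px - 1) py (by omega) (by omega)]
        by_cases hall : (shape.all fun c => !board.contains (px - 1 + c.1, py + c.2)) = true
        · rw [if_pos (show px > 0 ∧ (shape.all fun c => !board.contains (px - 1 + c.1, py + c.2)) = true from ⟨hpx, hall⟩)]
          exact tail (px - 1) (by omega) (by omega)
        · rw [if_neg (show ¬(px > 0 ∧ (shape.all fun c => !board.contains (px - 1 + c.1, py + c.2)) = true) from fun h => hall h.2)]
          exact tail px hpx0 hpxm
      · rw [if_neg (show ¬(px > 0 ∧ pvFree (pvRowsOf board) ((pvShapeRowsOf shape).items) (px - 1) py = true) from fun h => hpx h.1),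
          if_neg (show ¬(px > 0 ∧ (shape.all fun c => !board.contains (px - 1 + c.1, py + c.2)) = true) from fun h => hpx h.1)]
        exact tail px hpx0 hpxm
    · simp only [if_neg h1]
      by_cases h2 : mv = '>'
      · simp only [if_pos h2]
        by_cases hpx : px + mdx < 6
        · rw [pv_free_eq board shape mdx hdx (px + 1) py (by omega) (by omega)]
          by_cases hall : (shape.all fun c => !board.contains (px + 1 + c.1, py + c.2)) = true
          · rw [if_pos (show px + mdx < 6 ∧ (shape.all fun c => !board.contains (px + 1 + c.1, py + c.2)) = true from ⟨hpx, hall⟩)]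
            exact tail (px + 1) (by omega) (by omega)
          · rw [if_neg (show ¬(px + mdx < 6 ∧ (shape.all fun c => !board.contains (px + 1 + c.1, py + c.2)) = true) from fun h => hall h.2)]
            exact tail px hpx0 hpxm
        · rw [if_neg (show ¬(px + mdx < 6 ∧ pvFree (pvRowsOf board) ((pvShapeRowsOf shape).items) (px + 1) py = true) from fun h => hpx h.1),
            if_neg (show ¬(px + mdx < 6 ∧ (shape.all fun c => !board.contains (px + 1 + c.1, py + c.2)) = true) from fun h => hpx h.1)]
          exact tail px hpx0 hpxm
      · simp only [if_neg h2]
        exact tail px hpx0 hpxm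

-- ---- A-side lemmas (dict-of-cells loop reduced to pvLoopS) ----

-- shifting a duplicate-free shape gives duplicate-free absolute cells
lemma pv_shift_nodup (shape : List (Int × Int)) (h : shape.Nodup) (a b : Int) :
    (shape.map (fun c => (a + c.1, b + c.2))).Nodup := by
  apply List.Nodup.map _ h
  intro c d hcd
  cases c; cases d
  simp only [Prod.mk.injEq] at hcd ⊢
  omega

-- a fold of fresh inserts from the empty dict lists exactly the mapped cells
lemma pv_dict_fold_items (l : List (Int × Int)) (k : (Int × Int) → (Int × Int))
    (h : (l.map k).Nodup) :
    (l.foldl (fun d p => d.insert (k p) true) (PySem.Dict.empty : PySem.Dict (Int × Int) Bool)).items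
      = l.map (fun p => (k p, true)) := by
  have := PySem.Dict.items_foldl_insert_fresh l k (fun _ => true) PySem.Dict.empty
    (fun a _ => PySem.Dict.contains_empty _) h
  simpa using this

lemma pv_keys_of_items (d : PySem.Dict (Int × Int) Bool) (px py : Int) (shape : List (Int × Int))
    (h : d.items = shape.map (fun c => ((px + c.1, py + c.2), true))) :
    d.keys = shape.map (fun c => (px + c.1, py + c.2)) := by
  show d.items.map (·.1) = _
  rw [h, List.map_map]
  rfl

-- one sideways/down shift of the rock dict, described on the shape offsets
lemma pv_shift_dict (shape : List (Int × Int)) (hnd : shape.Nodup)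
    (px py a b : Int) (cur : PySem.Dict (Int × Int) Bool)
    (hkeys : cur.keys = shape.map (fun c => (px + c.1, py + c.2)))
    (f : (Int × Int) → (Int × Int))
    (g : PySem.Dict (Int × Int) Bool → (Int × Int) → PySem.Dict (Int × Int) Bool)
    (hg : g = fun d p => d.insert (f p) true)
    (hf : ∀ q : Int × Int, f (px + q.1, py + q.2) = (a + q.1, b + q.2)) :
    (cur.keys.foldl g PySem.Dict.empty).items = shape.map (fun c => ((a + c.1, b + c.2), true)) := by
  subst hg
  have e : (f ∘ fun c : Int × Int => (px + c.1, py + c.2)) = (fun c : Int × Int => (a + c.1, b + c.2)) := by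
    funext c
    exact hf c
  have hnd1 : (cur.keys.map f).Nodup := by
    rw [hkeys, List.map_map, e]
    exact pv_shift_nodup shape hnd a b
  rw [pv_dict_fold_items cur.keys f hnd1, hkeys, List.map_map]
  apply List.map_congr_left
  intro c _
  simp only [Function.comp_apply]
  rw [hf c]

-- A's per-cell drop test (collision-or-floor) equals the anchor test
lemma pv_drop_cond (board shape : List (Int × Int)) (px py : Int)
    (hdy0 : ∀ c ∈ shape, 0 ≤ c.2) (hex : ∃ c ∈ shape, c.2 = 0) :
    (shape.all (fun c => !(board.contains (px + c.1, py + c.2 - 1)) && !(decide (py + c.2 - 1 < 0))))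
      = (decide (py > 0) && shape.all (fun c => !(board.contains (px + c.1, py - 1 + c.2)))) := by
  apply Bool.eq_iff_iff.mpr
  simp only [List.all_eq_true, Bool.and_eq_true, Bool.not_eq_true', decide_eq_true_eq,
    decide_eq_false_iff_not, not_lt, gt_iff_lt]
  constructor
  · intro H
    rcases hex with ⟨c0, hc0, h0⟩
    have h1 := (H c0 hc0).2
    refine ⟨by omega, fun c hc => ?_⟩
    have := (H c hc).1
    have e : py - 1 + c.2 = py + c.2 - 1 := by ring
    rw [e]; exact this
  · rintro ⟨hpy, H⟩ c hc
    have e : py + c.2 - 1 = py - 1 + c.2 := by ring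
    refine ⟨by rw [e]; exact H c hc, ?_⟩
    have := hdy0 c hc
    omega

-- A's combined spawn fold splits into three independent folds
lemma pv_spawn_split (x y : Int) (shape : List (Int × Int)) :
    pvSpawnA x y shape =
      (shape.foldl (fun d c => d.insert (x + c.1, y + c.2) true) PySem.Dict.empty,
       shape.foldl (fun m c => max (x + c.1) m) 0,
       shape.foldl (fun m c => max (y + c.2) m) 0) := by
  unfold pvSpawnA
  suffices h : ∀ (l : List (Int × Int)) (d : PySem.Dict (Int × Int) Bool) (m1 m2 : Int),
      l.foldl (fun s c => (s.1.insert (x + c.1, y + c.2) true, max (x + c.1) s.2.1, max (y + c.2) s.2.2)) (d, m1, m2)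
        = (l.foldl (fun d c => d.insert (x + c.1, y + c.2) true) d,
           l.foldl (fun m c => max (x + c.1) m) m1,
           l.foldl (fun m c => max (y + c.2) m) m2) from h shape _ _ _
  intro l
  induction l with
  | nil => intro d m1 m2; rfl
  | cons c cs ih => intro d m1 m2; simp only [List.foldl_cons]; exact ih _ _ _

-- the main loop invariant: A's (cur_rock, min_x, max_x, max_y) state is the anchor (px, py)
lemma pv_loop_eq (board : List (Int × Int)) (moves : List Char) (hy : Int)
    (shape : List (Int × Int)) (mdx mdy : Int)
    (hnd : shape.Nodup) (hdy0 : ∀ c ∈ shape, 0 ≤ c.2)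
    (hex : ∃ c ∈ shape, c.2 = 0) (hmdy : 0 ≤ mdy) :
    ∀ (fuel : Nat) (cur : PySem.Dict (Int × Int) Bool) (px py mc : Int),
      cur.items = shape.map (fun c => ((px + c.1, py + c.2), true)) →
      (0 ≤ py ∨ py = hy + 4) → py ≤ hy + 4 →
      pvLoopA board moves hy fuel cur px (px + mdx)
          (py + mdy + max 0 (-(hy + 4 + mdy))) mc
        = pvLoopS board moves hy shape mdx mdy fuel px py mc := by
  intro fuel
  induction fuel with
  | zero => intro cur px py mc _ _ _; rfl
  | succ fuel ih =>
    intro cur px py mc hitems hdisj hle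
    have hkeys := pv_keys_of_items cur px py shape hitems
    simp only [pvLoopA, pvLoopS]
    set mv := PySem.List.pyGetD moves (PySem.Int.mod mc (moves.length : Int)) ' ' with hmv
    have tail : ∀ (cur2 : PySem.Dict (Int × Int) Bool) (px' : Int),
        cur2.items = shape.map (fun c => ((px' + c.1, py + c.2), true)) →
        ((if (cur2.keys.all fun p => !board.contains (p.1, p.2 - 1) && !decide (p.2 - 1 < 0)) = true then
            pvLoopA board moves hy fuel
              (List.foldl (fun d p => d.insert (p.1, p.2 - 1) true) PySem.Dict.empty cur2.keys)
              px' (px' + mdx) (py + mdy + max 0 (-(hy + 4 + mdy)) - 1) (mc + 1)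
          else
            (List.foldl (fun b p => PySem.Set.add b p) board cur2.keys,
              max (py + mdy + max 0 (-(hy + 4 + mdy))) hy, mc + 1))
          = if py > 0 ∧ (shape.all fun c => !board.contains (px' + c.1, py - 1 + c.2)) = true then
              pvLoopS board moves hy shape mdx mdy fuel px' (py - 1) (mc + 1)
            else
              (List.foldl (fun b c => PySem.Set.add b (px' + c.1, py + c.2)) board shape,
                max (max hy (py + mdy)) 0, mc + 1)) := by
      intro cur2 px' hitems2
      have hkeys2 := pv_keys_of_items cur2 px' py shape hitems2
      rw [hkeys2, List.all_map]
      have hcmp : ((fun p : Int × Int => !board.contains (p.1, p.2 - 1) && !decide (p.2 - 1 < 0)) ∘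
            fun c : Int × Int => (px' + c.1, py + c.2))
          = (fun c : Int × Int => !board.contains (px' + c.1, py + c.2 - 1) && !decide (py + c.2 - 1 < 0)) := rfl
      rw [hcmp, pv_drop_cond board shape px' py hdy0 hex]
      by_cases hpy : py > 0
      · by_cases hall : (shape.all fun c => !board.contains (px' + c.1, py - 1 + c.2)) = true
        · rw [if_pos (by rw [Bool.and_eq_true, decide_eq_true_eq]; exact And.intro hpy hall),
            if_pos (And.intro hpy hall)]
          have hitems3 := pv_shift_dict shape hnd px' py px' (py - 1) cur2 hkeys2
            (fun p => (p.1, p.2 - 1)) (fun d p => d.insert (p.1, p.2 - 1) true) rfl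
            (fun q => by rw [Prod.mk.injEq]; omega)
          rw [hkeys2] at hitems3
          have harith : py + mdy + max 0 (-(hy + 4 + mdy)) - 1
              = py - 1 + mdy + max 0 (-(hy + 4 + mdy)) := by ring
          rw [harith]
          exact ih _ (px') (py - 1) (mc + 1) hitems3 (Or.inl (by omega)) (by omega)
        · rw [if_neg (by intro hcc; rw [Bool.and_eq_true] at hcc; exact hall hcc.2),
            if_neg (show ¬(py > 0 ∧ (shape.all fun c => !board.contains (px' + c.1, py - 1 + c.2)) = true) from fun h => hall h.2)]
          refine congrArg₂ Prod.mk ?_ (congrArg₂ Prod.mk ?_ rfl)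
          · rw [List.foldl_map]
          · omega
      · rw [if_neg (by intro hcc; rw [Bool.and_eq_true, decide_eq_true_eq] at hcc; exact hpy hcc.1),
          if_neg (show ¬(py > 0 ∧ (shape.all fun c => !board.contains (px' + c.1, py - 1 + c.2)) = true) from fun h => hpy h.1)]
        refine congrArg₂ Prod.mk ?_ (congrArg₂ Prod.mk ?_ rfl)
        · rw [List.foldl_map]
        · omega
    by_cases h1 : mv = '<'
    · have hno : ¬(mv = '>' ∧ px + mdx < 6) := by
        rintro ⟨h, -⟩
        rw [h1] at h
        exact absurd h (by decide)
      by_cases hpx : px > 0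
      · have hL := pv_shift_dict shape hnd px py (px - 1) py cur hkeys
          (fun p => (p.1 - 1, p.2)) (fun d p => d.insert (p.1 - 1, p.2) true) rfl
          (fun q => by rw [Prod.mk.injEq]; omega)
        have hkL := pv_keys_of_items _ (px - 1) py shape hL
        have hAall : ((List.foldl (fun d p => d.insert (p.1 - 1, p.2) true) PySem.Dict.empty cur.keys).keys.all
              fun p => !board.contains p)
            = (shape.all fun c => !board.contains (px - 1 + c.1, py + c.2)) := by
          rw [hkL, List.all_map]
          rfl
        by_cases hall : (shape.all fun c => !board.contains (px - 1 + c.1, py + c.2)) = true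
        · rw [if_pos (And.intro h1 hpx), hAall, if_pos hall, if_pos h1, if_pos (And.intro hpx hall)]
          dsimp only
          have harx : px + mdx - 1 = px - 1 + mdx := by ring
          rw [harx]
          exact tail _ (px - 1) hL
        · rw [if_pos (And.intro h1 hpx), hAall, if_neg hall, if_pos h1, if_neg (show ¬(px > 0 ∧ (shape.all fun c => !board.contains (px - 1 + c.1, py + c.2)) = true) from fun h => hall h.2)]
          dsimp only
          exact tail cur px hitems
      · rw [if_neg (show ¬(mv = '<' ∧ px > 0) from fun h => hpx h.2), if_neg hno, if_pos h1,
          if_neg (show ¬(px > 0 ∧ (shape.all fun c => !board.contains (px - 1 + c.1, py + c.2)) = true) from fun h => hpx h.1)]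
        dsimp only
        exact tail cur px hitems
    · by_cases h2 : mv = '>'
      · have hn1 : ¬(mv = '<' ∧ px > 0) := fun h => h1 h.1
        by_cases hpx : px + mdx < 6
        · have hR := pv_shift_dict shape hnd px py (px + 1) py cur hkeys
            (fun p => (p.1 + 1, p.2)) (fun d p => d.insert (p.1 + 1, p.2) true) rfl
            (fun q => by rw [Prod.mk.injEq]; omega)
          have hkR := pv_keys_of_items _ (px + 1) py shape hR
          have hAall : ((List.foldl (fun d p => d.insert (p.1 + 1, p.2) true) PySem.Dict.empty cur.keys).keys.all
                fun p => !board.contains p)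
              = (shape.all fun c => !board.contains (px + 1 + c.1, py + c.2)) := by
            rw [hkR, List.all_map]
            rfl
          by_cases hall : (shape.all fun c => !board.contains (px + 1 + c.1, py + c.2)) = true
          · rw [if_neg hn1, if_pos (And.intro h2 hpx), hAall, if_pos hall, if_neg h1, if_pos h2, if_pos (And.intro hpx hall)]
            dsimp only
            have harx : px + mdx + 1 = px + 1 + mdx := by ring
            rw [harx]
            exact tail _ (px + 1) hR
          · rw [if_neg hn1, if_pos (And.intro h2 hpx), hAall, if_neg hall, if_neg h1, if_pos h2, if_neg (show ¬(px + mdx < 6 ∧ (shape.all fun c => !board.contains (px + 1 + c.1, py + c.2)) = true) from fun h => hall h.2)]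
            dsimp only
            exact tail cur px hitems
        · rw [if_neg hn1, if_neg (show ¬(mv = '>' ∧ px + mdx < 6) from fun h => hpx h.2), if_neg h1, if_pos h2,
            if_neg (show ¬(px + mdx < 6 ∧ (shape.all fun c => !board.contains (px + 1 + c.1, py + c.2)) = true) from fun h => hpx h.1)]
          dsimp only
          exact tail cur px hitems
      · rw [if_neg (show ¬(mv = '<' ∧ px > 0) from fun h => h1 h.1), if_neg (show ¬(mv = '>' ∧ px + mdx < 6) from fun h => h2 h.1), if_neg h1, if_neg h2]
        dsimp only
        exact tail cur px hitems

-- spawn plus A's loop, reduced to B's bitmask loop, for one concrete shape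
lemma pv_top (board : List (Int × Int)) (moves : List Char) (hy mc : Int)
    (shape : List (Int × Int)) (mdx mdy : Int)
    (hnd : shape.Nodup) (hdy0 : ∀ c ∈ shape, 0 ≤ c.2)
    (hex : ∃ c ∈ shape, c.2 = 0) (hmdy : 0 ≤ mdy)
    (hdx : ∀ c ∈ shape, 0 ≤ c.1 ∧ c.1 ≤ mdx) (hmdx6 : 2 + mdx ≤ 6)
    (hmaxx : shape.foldl (fun m c => max (2 + c.1) m) 0 = 2 + mdx)
    (hmaxy : shape.foldl (fun m c => max (hy + 4 + c.2) m) 0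
      = hy + 4 + mdy + max 0 (-(hy + 4 + mdy))) :
    pvLoopA board moves hy ((hy + 5).toNat + 1) (pvSpawnA 2 (hy + 4) shape).1 2
        (pvSpawnA 2 (hy + 4) shape).2.1 (pvSpawnA 2 (hy + 4) shape).2.2 mc
      = pvLoopB board moves hy shape (pvRowsOf board) ((pvShapeRowsOf shape).items) mdx mdy
          ((hy + 5).toNat + 1) 2 (hy + 4) mc := by
  rw [pv_spawn_split]
  dsimp only
  rw [hmaxx, hmaxy]
  have hitems : (shape.foldl (fun d c => d.insert (2 + c.1, hy + 4 + c.2) true) PySem.Dict.empty).items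
      = shape.map (fun c => (((2 : Int) + c.1, hy + 4 + c.2), true)) :=
    pv_dict_fold_items shape (fun c => (2 + c.1, hy + 4 + c.2)) (pv_shift_nodup shape hnd 2 (hy + 4))
  rw [pv_loop_eq board moves hy shape mdx mdy hnd hdy0 hex hmdy _ _ 2 (hy + 4) mc hitems
    (Or.inr rfl) le_rfl]
  rw [pv_loopB_eq_S board moves hy shape mdx mdy hdx _ 2 (hy + 4) mc (by omega) hmdx6]

-- ===== VERDICT (by name: the statement is the Claim_ definition above) =====
theorem add_rock_spec : Claim_equal_add_rock := by
  unfold Claim_equal_add_rock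
  intro board moves hy rc mc _ _
  unfold Spec_add_rock add_rock add_rock_alt
  have hlen : ((pvShapes.length : Nat) : Int) = 5 := by decide
  rw [hlen]
  have h0 : 0 ≤ PySem.Int.mod rc 5 := PySem.Int.mod_nonneg rc (by norm_num)
  have h5 : PySem.Int.mod rc 5 < 5 := PySem.Int.mod_lt rc (by norm_num)
  have hcase : PySem.Int.mod rc 5 = 0 ∨ PySem.Int.mod rc 5 = 1 ∨ PySem.Int.mod rc 5 = 2 ∨
      PySem.Int.mod rc 5 = 3 ∨ PySem.Int.mod rc 5 = 4 := by omega
  rcases hcase with h | h | h | h | h <;> rw [h]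
  · simp only [show PySem.List.pyGetD pvShapes (0 : Int) ([] : List (Int × Int)) = [(0, 0), (1, 0), (2, 0), (3, 0)] from by decide,
      show (PySem.List.max? (List.map (fun c => c.1) ([(0, 0), (1, 0), (2, 0), (3, 0)] : List (Int × Int))) fun v => v).getD 0 = 3 from by decide,
      show (PySem.List.max? (List.map (fun c => c.2) ([(0, 0), (1, 0), (2, 0), (3, 0)] : List (Int × Int))) fun v => v).getD 0 = 0 from by decide]
    exact pv_top board moves.toList hy mc [(0, 0), (1, 0), (2, 0), (3, 0)] 3 0 (by decide) (by decide) (by decide)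
      (by decide) (by decide) (by decide) (by decide) (by simp only [List.foldl_cons, List.foldl_nil]; omega)
  · simp only [show PySem.List.pyGetD pvShapes (1 : Int) ([] : List (Int × Int)) = [(0, 1), (1, 0), (1, 1), (1, 2), (2, 1)] from by decide,
      show (PySem.List.max? (List.map (fun c => c.1) ([(0, 1), (1, 0), (1, 1), (1, 2), (2, 1)] : List (Int × Int))) fun v => v).getD 0 = 2 from by decide,
      show (PySem.List.max? (List.map (fun c => c.2) ([(0, 1), (1, 0), (1, 1), (1, 2), (2, 1)] : List (Int × Int))) fun v => v).getD 0 = 2 from by decide]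
    exact pv_top board moves.toList hy mc [(0, 1), (1, 0), (1, 1), (1, 2), (2, 1)] 2 2 (by decide) (by decide) (by decide)
      (by decide) (by decide) (by decide) (by decide) (by simp only [List.foldl_cons, List.foldl_nil]; omega)
  · simp only [show PySem.List.pyGetD pvShapes (2 : Int) ([] : List (Int × Int)) = [(0, 0), (1, 0), (2, 0), (2, 1), (2, 2)] from by decide,
      show (PySem.List.max? (List.map (fun c => c.1) ([(0, 0), (1, 0), (2, 0), (2, 1), (2, 2)] : List (Int × Int))) fun v => v).getD 0 = 2 from by decide,
      show (PySem.List.max? (List.map (fun c => c.2) ([(0, 0), (1, 0), (2, 0), (2, 1), (2, 2)] : List (Int × Int))) fun v => v).getD 0 = 2 from by decide]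
    exact pv_top board moves.toList hy mc [(0, 0), (1, 0), (2, 0), (2, 1), (2, 2)] 2 2 (by decide) (by decide) (by decide)
      (by decide) (by decide) (by decide) (by decide) (by simp only [List.foldl_cons, List.foldl_nil]; omega)
  · simp only [show PySem.List.pyGetD pvShapes (3 : Int) ([] : List (Int × Int)) = [(0, 0), (0, 1), (0, 2), (0, 3)] from by decide,
      show (PySem.List.max? (List.map (fun c => c.1) ([(0, 0), (0, 1), (0, 2), (0, 3)] : List (Int × Int))) fun v => v).getD 0 = 0 from by decide,
      show (PySem.List.max? (List.map (fun c => c.2) ([(0, 0), (0, 1), (0, 2), (0, 3)] : List (Int × Int))) fun v => v).getD 0 = 3 from by decide]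
    exact pv_top board moves.toList hy mc [(0, 0), (0, 1), (0, 2), (0, 3)] 0 3 (by decide) (by decide) (by decide)
      (by decide) (by decide) (by decide) (by decide) (by simp only [List.foldl_cons, List.foldl_nil]; omega)
  · simp only [show PySem.List.pyGetD pvShapes (4 : Int) ([] : List (Int × Int)) = [(0, 0), (1, 0), (0, 1), (1, 1)] from by decide,
      show (PySem.List.max? (List.map (fun c => c.1) ([(0, 0), (1, 0), (0, 1), (1, 1)] : List (Int × Int))) fun v => v).getD 0 = 1 from by decide,
      show (PySem.List.max? (List.map (fun c => c.2) ([(0, 0), (1, 0), (0, 1), (1, 1)] : List (Int × Int))) fun v => v).getD 0 = 1 from by decide]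
    exact pv_top board moves.toList hy mc [(0, 0), (1, 0), (0, 1), (1, 1)] 1 1 (by decide) (by decide) (by decide)
      (by decide) (by decide) (by decide) (by decide) (by simp only [List.foldl_cons, List.foldl_nil]; omega)
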